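-- pv_equiv track=rewrite | github.com/bobshen0721/new_whisperx | app.py | build_speaker_theme_map
-- ===== SOURCE A (Python) =====
-- SPEAKER_THEMES = [
--     {"bg": "#E8F1FF", "accent": "#1D4ED8"},
--     {"bg": "#FFF1E8", "accent": "#C2410C"},
--     {"bg": "#EAFBF0", "accent": "#15803D"},
--     {"bg": "#FFF7D6", "accent": "#A16207"},
--     {"bg": "#F3E8FF", "accent": "#7E22CE"},
--     {"bg": "#FDE7EF", "accent": "#BE185D"},
--     {"bg": "#E6FCF5", "accent": "#0F766E"},
--     {"bg": "#F3F4F6", "accent": "#4B5563"},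
-- ]
--
-- UNKNOWN_THEME = {"bg": "#F3F4F6", "accent": "#6B7280"}
--
-- def build_speaker_theme_map(rows: list[dict]) -> dict[str, dict[str, str]]:
--     mapping: dict[str, dict[str, str]] = {}
--     theme_index = 0
--     for row in rows:
--         speaker = row["speaker"]
--         if speaker == "UNKNOWN":
--             mapping[speaker] = UNKNOWN_THEME
--             continue
--         if speaker not in mapping:
--             mapping[speaker] = SPEAKER_THEMES[theme_index % len(SPEAKER_THEMES)]
--             theme_index += 1
--     if "UNKNOWN" not in mapping:
--         mapping["UNKNOWN"] = UNKNOWN_THEME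
--     return mapping
-- ===== SOURCE B (Python) =====
-- SPEAKER_THEMES = [
--     {"bg": "#E8F1FF", "accent": "#1D4ED8"},
--     {"bg": "#FFF1E8", "accent": "#C2410C"},
--     {"bg": "#EAFBF0", "accent": "#15803D"},
--     {"bg": "#FFF7D6", "accent": "#A16207"},
--     {"bg": "#F3E8FF", "accent": "#7E22CE"},
--     {"bg": "#FDE7EF", "accent": "#BE185D"},
--     {"bg": "#E6FCF5", "accent": "#0F766E"},
--     {"bg": "#F3F4F6", "accent": "#4B5563"},
-- ]
--
-- UNKNOWN_THEME = {"bg": "#F3F4F6", "accent": "#6B7280"}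
--
--
-- def build_speaker_theme_map(rows: list[dict]) -> dict[str, dict[str, str]]:
--     # Key order of the result: distinct speakers in first-appearance order,
--     # with UNKNOWN appended if it never occurred.
--     order = list(dict.fromkeys(r["speaker"] for r in rows))
--     if "UNKNOWN" not in order:
--         order.append("UNKNOWN")
--     # A speaker's theme is determined by its rank among the named speakers.
--     named = [s for s in order if s != "UNKNOWN"]
--     return {s: (UNKNOWN_THEME if s == "UNKNOWN"
--                 else SPEAKER_THEMES[named.index(s) % len(SPEAKER_THEMES)])
--             for s in order}
-- ===== Notes on version B (the rewrite author's own statement) =====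
-- stated objective: alternative
-- what changed: A's single interleaved streaming pass over rows (mutable dict, running theme counter, UNKNOWN special-cased inside the loop) is replaced by a staged pipeline without any running counter: dedupe the speaker stream (appending UNKNOWN if absent), then build the result by mapping each speaker to a theme chosen by its rank in the list of named speakers (named.index(s)).
import Mathlib
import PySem

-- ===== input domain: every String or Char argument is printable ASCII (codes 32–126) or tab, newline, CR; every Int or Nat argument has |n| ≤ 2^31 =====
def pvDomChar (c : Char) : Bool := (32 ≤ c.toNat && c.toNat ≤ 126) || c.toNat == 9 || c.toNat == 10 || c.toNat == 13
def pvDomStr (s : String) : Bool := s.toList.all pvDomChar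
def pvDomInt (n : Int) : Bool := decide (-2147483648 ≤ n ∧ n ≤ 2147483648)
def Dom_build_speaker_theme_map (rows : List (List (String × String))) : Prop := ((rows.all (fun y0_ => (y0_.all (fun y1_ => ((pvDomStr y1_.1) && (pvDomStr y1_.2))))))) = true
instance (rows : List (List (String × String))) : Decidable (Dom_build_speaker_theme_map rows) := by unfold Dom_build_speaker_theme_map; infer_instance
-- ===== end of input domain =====

-- B replaces A's streaming pass (mutable dict + running counter) by a staged pipeline:
-- dedupe the speakers, then map each to the theme picked by its rank among the named speakers.

def SPEAKER_THEMES : List (List (String × String)) :=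
  [ [("bg", "#E8F1FF"), ("accent", "#1D4ED8")],
    [("bg", "#FFF1E8"), ("accent", "#C2410C")],
    [("bg", "#EAFBF0"), ("accent", "#15803D")],
    [("bg", "#FFF7D6"), ("accent", "#A16207")],
    [("bg", "#F3E8FF"), ("accent", "#7E22CE")],
    [("bg", "#FDE7EF"), ("accent", "#BE185D")],
    [("bg", "#E6FCF5"), ("accent", "#0F766E")],
    [("bg", "#F3F4F6"), ("accent", "#4B5563")] ]

def UNKNOWN_THEME : List (String × String) := [("bg", "#F3F4F6"), ("accent", "#6B7280")]

-- ===== PORT A =====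
-- loop body of A for one speaker value (the index is always in range, so `.getD []` never fires)
def bstmStepA (st : PySem.Dict String (List (String × String)) × Int) (speaker : String) :
    PySem.Dict String (List (String × String)) × Int :=
  if speaker = "UNKNOWN" then (st.1.insert speaker UNKNOWN_THEME, st.2)
  else if st.1.contains speaker then st
  else (st.1.insert speaker ((PySem.List.pyGet? SPEAKER_THEMES (PySem.Int.mod st.2 (SPEAKER_THEMES.length : Int))).getD []), st.2 + 1)

def build_speaker_theme_map (rows : List (List (String × String))) : List (String × List (String × String)) :=
  let st := rows.foldl (fun st row =>
    match (PySem.Dict.mk row).get? "speaker" with   -- row["speaker"]; none = KeyError, excluded by Pre_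
    | none => st
    | some speaker => bstmStepA st speaker) (PySem.Dict.empty, (0 : Int))
  let mapping := if st.1.contains "UNKNOWN" then st.1 else st.1.insert "UNKNOWN" UNKNOWN_THEME
  mapping.items

-- ===== PORT B =====
def build_speaker_theme_map_alt (rows : List (List (String × String))) : List (String × List (String × String)) :=
  let order0 := PySem.List.dedup (rows.filterMap (fun row => (PySem.Dict.mk row).get? "speaker"))  -- list(dict.fromkeys(...)); missing "speaker" key excluded by Pre_
  let order := if "UNKNOWN" ∈ order0 then order0 else order0 ++ ["UNKNOWN"]
  let named := order.filter (fun s => !(s == "UNKNOWN"))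
  -- dict comprehension over the distinct keys of `order` = association list in that order;
  -- named.index(s) never raises here since s ∈ named whenever the branch is taken (.getD 0 is a totality guard only)
  order.map (fun s => (s, if s == "UNKNOWN" then UNKNOWN_THEME
    else (PySem.List.pyGet? SPEAKER_THEMES
      (PySem.Int.mod (((PySem.List.index? named s).getD 0 : Nat) : Int) (SPEAKER_THEMES.length : Int))).getD []))

-- ===== PRECONDITION & SPEC =====
-- Pre_ excludes exactly the rows without a "speaker" key, on which Python A raises KeyError.
def Pre_build_speaker_theme_map (rows : List (List (String × String))) : Prop :=
  (rows.all (fun row => row.any (fun p => p.1 == "speaker"))) = true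
instance (rows : List (List (String × String))) : Decidable (Pre_build_speaker_theme_map rows) := by
  unfold Pre_build_speaker_theme_map; infer_instance

def pvWitness_build_speaker_theme_map : (List (List (String × String))) :=
  [[("speaker", "alice"), ("text", "hi")], [("speaker", "UNKNOWN")], [("speaker", "alice")]]

def Spec_build_speaker_theme_map (rows : List (List (String × String))) (out : List (String × List (String × String))) : Prop := out = build_speaker_theme_map_alt rows
instance (rows : List (List (String × String))) (out : List (String × List (String × String))) : Decidable (Spec_build_speaker_theme_map rows out) := by unfold Spec_build_speaker_theme_map; infer_instance

-- ===== CLAIM (what is proved, stated in full; the proofs are below) =====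
def Claim_equal_build_speaker_theme_map : Prop := ∀ (rows : List (List (String × String))), Dom_build_speaker_theme_map rows → Pre_build_speaker_theme_map rows → Spec_build_speaker_theme_map rows (build_speaker_theme_map rows)

-- ===== LEMMAS AND PROOFS =====

-- the theme A assigns when the running counter is i
def bstmTheme (i : Int) : List (String × String) :=
  (PySem.List.pyGet? SPEAKER_THEMES (PySem.Int.mod i (SPEAKER_THEMES.length : Int))).getD []

-- proof-only model of A's loop body over a deduplicated stream (every key fresh)
def bstmStepF (st : PySem.Dict String (List (String × String)) × Int) (speaker : String) :
    PySem.Dict String (List (String × String)) × Int :=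
  if speaker = "UNKNOWN" then (st.1.insert speaker UNKNOWN_THEME, st.2)
  else (st.1.insert speaker (bstmTheme st.2), st.2 + 1)

-- the (key, theme) pairs A's fresh-key loop appends, starting from counter i
def bstmAssign (i : Int) : List String → List (String × List (String × String))
  | [] => []
  | s :: t => if s = "UNKNOWN" then ("UNKNOWN", UNKNOWN_THEME) :: bstmAssign i t
              else (s, bstmTheme i) :: bstmAssign (i + 1) t

-- A's fold over rows is its fold over the extracted speaker stream.
theorem bstm_foldA_filterMap (rows : List (List (String × String)))
    (st : PySem.Dict String (List (String × String)) × Int) :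
    rows.foldl (fun st row =>
      match (PySem.Dict.mk row).get? "speaker" with
      | none => st
      | some speaker => bstmStepA st speaker) st
    = (rows.filterMap (fun row => (PySem.Dict.mk row).get? "speaker")).foldl bstmStepA st := by
  induction rows generalizing st with
  | nil => rfl
  | cons r rest ih =>
    simp only [List.foldl_cons, List.filterMap_cons]
    cases (PySem.Dict.mk r).get? "speaker" <;> simp [ih]

-- in either branch, the fresh-key loop body inserts the speaker
theorem bstm_stepF_fst (st : PySem.Dict String (List (String × String)) × Int) (s : String) :
    (bstmStepF st s).1 = st.1.insert s (if s = "UNKNOWN" then UNKNOWN_THEME else bstmTheme st.2) := by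
  unfold bstmStepF; split_ifs with h <;> simp [h]

-- A's loop body on the three kinds of speaker
theorem bstm_stepA_unknown (st : PySem.Dict String (List (String × String)) × Int) :
    bstmStepA st "UNKNOWN" = (st.1.insert "UNKNOWN" UNKNOWN_THEME, st.2) := by
  simp [bstmStepA]

theorem bstm_stepA_mem (st : PySem.Dict String (List (String × String)) × Int) (s : String)
    (hu : s ≠ "UNKNOWN") (hc : st.1.contains s = true) : bstmStepA st s = st := by
  simp [bstmStepA, hu, hc]

theorem bstm_stepA_fresh (st : PySem.Dict String (List (String × String)) × Int) (s : String)
    (hc : st.1.contains s = false) : bstmStepA st s = bstmStepF st s := by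
  by_cases hu : s = "UNKNOWN" <;> simp [bstmStepA, bstmStepF, bstmTheme, hu, hc]

-- keys membership through the fresh-key loop
theorem bstm_contains_foldF (l : List String)
    (st : PySem.Dict String (List (String × String)) × Int) (k : String) :
    ((l.foldl bstmStepF st).1).contains k = (st.1.contains k || decide (k ∈ l)) := by
  induction l generalizing st with
  | nil => simp
  | cons s rest ih =>
    simp only [List.foldl_cons, ih, bstm_stepF_fst, PySem.Dict.contains_insert, List.mem_cons]
    by_cases hk : k = s
    · simp [hk]
    · rw [beq_eq_false_iff_ne.mpr hk]; simp [hk]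

-- the UNKNOWN key always carries UNKNOWN_THEME through the fresh-key loop
theorem bstm_get?_unknown_foldF (l : List String)
    (st : PySem.Dict String (List (String × String)) × Int) :
    ((l.foldl bstmStepF st).1).get? "UNKNOWN"
      = if "UNKNOWN" ∈ l then some UNKNOWN_THEME else st.1.get? "UNKNOWN" := by
  induction l generalizing st with
  | nil => simp
  | cons s rest ih =>
    simp only [List.foldl_cons, ih, List.mem_cons]
    by_cases h : s = "UNKNOWN"
    · by_cases hm : "UNKNOWN" ∈ rest <;>
        simp [h, hm, bstm_stepF_fst, PySem.Dict.get?_insert_self]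
    · have h' : "UNKNOWN" ≠ s := fun he => h he.symm
      by_cases hm : "UNKNOWN" ∈ rest <;>
        simp [hm, h', bstm_stepF_fst, PySem.Dict.get?_insert_of_ne _ _ h']

-- keys stay Nodup through the fresh-key loop
theorem bstm_nodup_foldF (l : List String)
    (st : PySem.Dict String (List (String × String)) × Int) (h : st.1.keys.Nodup) :
    ((l.foldl bstmStepF st).1).keys.Nodup := by
  induction l generalizing st with
  | nil => exact h
  | cons s rest ih =>
    rw [List.foldl_cons]
    exact ih _ (by rw [bstm_stepF_fst]; exact PySem.Dict.nodup_keys_insert _ _ _ h)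

-- inserting a key with the value it already has is a no-op
theorem dict_insert_same {κ ν : Type} [BEq κ] [LawfulBEq κ]
    (d : PySem.Dict κ ν) (k : κ) (v : ν)
    (hget : d.get? k = some v) (hnd : d.keys.Nodup) : d.insert k v = d := by
  apply PySem.Dict.ext
  have hc : d.contains k = true := by
    rw [PySem.Dict.contains_eq_isSome_get?, hget]; rfl
  rw [PySem.Dict.items_insert_of_contains d v hc]
  have hmem := (PySem.Dict.get?_eq_some_iff_mem_items d k v hnd).mp hget
  have hnd' : (d.items.map Prod.fst).Nodup := by
    simpa only [PySem.Dict.keys] using hnd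
  conv_rhs => rw [← List.map_id d.items]
  apply List.map_congr_left
  intro p hp
  by_cases hpk : p.1 = k
  · have : p = (k, v) := by
      apply List.inj_on_of_nodup_map hnd' hp hmem
      simpa using hpk
    simp [this]
  · simp [hpk]

-- appending one element to the stream deduplicates as expected
theorem dedup_concat {α : Type} [BEq α] [LawfulBEq α] (p : List α) (s : α) :
    PySem.List.dedup (p ++ [s]) = if s ∈ p then PySem.List.dedup p else PySem.List.dedup p ++ [s] := by
  simp only [PySem.List.dedup_eq_ofList, PySem.Set.ofList, List.foldl_append, List.foldl_cons,
    List.foldl_nil, PySem.Set.add]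
  have : (List.foldl PySem.Set.add PySem.Set.empty p).contains s
      = decide (s ∈ PySem.List.dedup p) := by
    simp [PySem.List.dedup_eq_ofList, PySem.Set.ofList]
  rw [this]
  by_cases h : s ∈ p <;> simp [h]

-- INVARIANT 1: A's streaming fold from the empty state equals the fresh-key
-- fold over the deduplicated stream.
theorem bstm_main (p : List String) :
    p.foldl bstmStepA (PySem.Dict.empty, (0 : Int))
      = (PySem.List.dedup p).foldl bstmStepF (PySem.Dict.empty, (0 : Int)) := by
  induction p using List.reverseRecOn with
  | nil => rfl
  | append_singleton p s ih =>
    rw [List.foldl_append, List.foldl_cons, List.foldl_nil, ih, dedup_concat]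
    by_cases hmem : s ∈ p
    · rw [if_pos hmem]
      by_cases hu : s = "UNKNOWN"
      · subst hu
        have hin : "UNKNOWN" ∈ PySem.List.dedup p :=
          (PySem.List.mem_dedup p _).mpr hmem
        have hget := bstm_get?_unknown_foldF (PySem.List.dedup p) (PySem.Dict.empty, (0 : Int))
        rw [if_pos hin] at hget
        have hnd := bstm_nodup_foldF (PySem.List.dedup p) (PySem.Dict.empty, (0 : Int)) (by simp)
        rw [bstm_stepA_unknown, dict_insert_same _ _ _ hget hnd]
      · have hc : ((PySem.List.dedup p).foldl bstmStepF (PySem.Dict.empty, (0 : Int))).1.contains s = true := by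
          rw [bstm_contains_foldF]
          simpa using hmem
        rw [bstm_stepA_mem _ _ hu hc]
    · rw [if_neg hmem, List.foldl_append, List.foldl_cons, List.foldl_nil]
      have hc : ((PySem.List.dedup p).foldl bstmStepF (PySem.Dict.empty, (0 : Int))).1.contains s = false := by
        rw [bstm_contains_foldF]
        simpa using hmem
      rw [bstm_stepA_fresh _ _ hc]

-- INVARIANT 2: over fresh distinct keys, the fold appends exactly bstmAssign
theorem bstm_foldF_items (l : List String)
    (d : PySem.Dict String (List (String × String))) (i : Int)
    (hnd : l.Nodup) (hfresh : ∀ s ∈ l, d.contains s = false) :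
    ((l.foldl bstmStepF (d, i)).1).items = d.items ++ bstmAssign i l := by
  induction l generalizing d i with
  | nil => simp [bstmAssign]
  | cons s t ih =>
    have hs : d.contains s = false := hfresh s (List.mem_cons_self)
    have hfresh' : ∀ x ∈ t, (bstmStepF (d, i) s).1.contains x = false := by
      intro x hx
      rw [bstm_stepF_fst, PySem.Dict.contains_insert]
      have hxs : x ≠ s := fun he => (List.nodup_cons.mp hnd).1 (he ▸ hx)
      rw [beq_eq_false_iff_ne.mpr hxs]
      simpa using hfresh x (List.mem_cons_of_mem _ hx)
    rw [List.foldl_cons]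
    by_cases hu : s = "UNKNOWN"
    · subst hu
      have hstep : bstmStepF (d, i) "UNKNOWN" = (d.insert "UNKNOWN" UNKNOWN_THEME, i) := by
        simp [bstmStepF]
      rw [hstep] at hfresh' ⊢
      rw [ih _ _ (List.nodup_cons.mp hnd).2 hfresh',
        PySem.Dict.items_insert_of_not_contains _ _ hs]
      simp [bstmAssign]
    · have hstep : bstmStepF (d, i) s = (d.insert s (bstmTheme i), i + 1) := by
        simp [bstmStepF, hu]
      rw [hstep] at hfresh' ⊢
      rw [ih _ _ (List.nodup_cons.mp hnd).2 hfresh',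
        PySem.Dict.items_insert_of_not_contains _ _ hs]
      simp [bstmAssign, hu]

-- INVARIANT 3: bstmAssign is the rank-among-named-speakers assignment B computes
theorem bstm_assign_eq_map (l : List String) (i : Int) (hnd : l.Nodup) :
    bstmAssign i l = l.map (fun s => (s, if s == "UNKNOWN" then UNKNOWN_THEME
      else bstmTheme (i + (((PySem.List.index? (l.filter (fun x => !(x == "UNKNOWN"))) s).getD 0 : Nat) : Int)))) := by
  induction l generalizing i with
  | nil => rfl
  | cons s t ih =>
    by_cases hu : s = "UNKNOWN"
    · subst hu
      have hfil : ("UNKNOWN" :: t).filter (fun x => !(x == "UNKNOWN"))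
          = t.filter (fun x => !(x == "UNKNOWN")) := by simp
      rw [show bstmAssign i ("UNKNOWN" :: t) = ("UNKNOWN", UNKNOWN_THEME) :: bstmAssign i t from by
        simp [bstmAssign]]
      rw [List.map_cons, hfil, ← ih i (List.nodup_cons.mp hnd).2]
      simp
    · have hfil : (s :: t).filter (fun x => !(x == "UNKNOWN"))
          = s :: t.filter (fun x => !(x == "UNKNOWN")) := by simp [hu]
      rw [show bstmAssign i (s :: t) = (s, bstmTheme i) :: bstmAssign (i + 1) t from by
        simp [bstmAssign, hu]]
      rw [List.map_cons, hfil]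
      congr 1
      · rw [PySem.List.index?_cons_self]
        simp [hu]
      · rw [ih (i + 1) (List.nodup_cons.mp hnd).2]
        apply List.map_congr_left
        intro x hx
        by_cases hxu : x = "UNKNOWN"
        · simp [hxu]
        · have hxs : s ≠ x := fun he => (List.nodup_cons.mp hnd).1 (he ▸ hx)
          have hxmem : x ∈ t.filter (fun x => !(x == "UNKNOWN")) := by
            simp [List.mem_filter, hx, hxu]
          obtain ⟨k, hk⟩ : ∃ k, PySem.List.index? (t.filter (fun x => !(x == "UNKNOWN"))) x = some k := by
            cases h : PySem.List.index? (t.filter (fun x => !(x == "UNKNOWN"))) x with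
            | none =>
              rw [PySem.List.index?_eq_none_iff] at h
              exact absurd hxmem h
            | some k => exact ⟨k, rfl⟩
          rw [PySem.List.index?_cons_of_ne _ hxs, hk]
          simp only [Option.map_some, Option.getD_some]
          rw [if_neg (by simpa using hxu), if_neg (by simpa using hxu)]
          congr 1
          push_cast
          ring_nf

-- the appended UNKNOWN keeps the order Nodup
theorem bstm_order_nodup (p : List String) (h : "UNKNOWN" ∉ PySem.List.dedup p) :
    (PySem.List.dedup p ++ ["UNKNOWN"]).Nodup := by
  refine List.Nodup.append (PySem.List.nodup_dedup p) (List.nodup_singleton _) ?_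
  intro x hx hy
  simp only [List.mem_singleton] at hy
  exact h (hy ▸ hx)

-- ===== VERDICT (by name: the statement is the Claim_ definition above) =====
theorem build_speaker_theme_map_spec : Claim_equal_build_speaker_theme_map := by
  intro rows _ _
  show build_speaker_theme_map rows = build_speaker_theme_map_alt rows
  unfold build_speaker_theme_map build_speaker_theme_map_alt
  dsimp only
  rw [bstm_foldA_filterMap, bstm_main]
  set p := rows.filterMap (fun row => (PySem.Dict.mk row).get? "speaker") with hp
  have hemp : (PySem.Dict.empty : PySem.Dict String (List (String × String))).items = [] := rfl
  by_cases hu : "UNKNOWN" ∈ PySem.List.dedup p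
  · have hup : "UNKNOWN" ∈ p := (PySem.List.mem_dedup p _).mp hu
    have hc : ((PySem.List.dedup p).foldl bstmStepF (PySem.Dict.empty, (0 : Int))).1.contains "UNKNOWN" = true := by
      rw [bstm_contains_foldF]; simp [hup]
    rw [if_pos hc, if_pos hu,
      bstm_foldF_items _ _ _ (PySem.List.nodup_dedup p) (fun s _ => by simp),
      bstm_assign_eq_map _ _ (PySem.List.nodup_dedup p), hemp]
    simp only [List.nil_append, zero_add]
    rfl
  · have hup : "UNKNOWN" ∉ p := fun h => hu ((PySem.List.mem_dedup p _).mpr h)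
    have hc : ((PySem.List.dedup p).foldl bstmStepF (PySem.Dict.empty, (0 : Int))).1.contains "UNKNOWN" = false := by
      rw [bstm_contains_foldF]; simp [hup]
    rw [if_neg (by rw [hc]; simp), if_neg hu]
    have hins : ((PySem.List.dedup p).foldl bstmStepF (PySem.Dict.empty, (0 : Int))).1.insert "UNKNOWN" UNKNOWN_THEME
        = (((PySem.List.dedup p) ++ ["UNKNOWN"]).foldl bstmStepF (PySem.Dict.empty, (0 : Int))).1 := by
      rw [List.foldl_append, List.foldl_cons, List.foldl_nil, bstm_stepF_fst]
      simp
    rw [hins,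
      bstm_foldF_items _ _ _ (bstm_order_nodup p hu) (fun s _ => by simp),
      bstm_assign_eq_map _ _ (bstm_order_nodup p hu), hemp]
    simp only [List.nil_append, zero_add]
    rfl
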